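-- pv_equiv track=rewrite | github.com/prowestjonny88/404NotFounders | apps/api/app/services/news_event_service.py | _risk_hint
-- ===== SOURCE A (Python) =====
-- def _risk_hint(category: str, text: str) -> str:
--     if category == "logistics" and any(term in text for term in ("congestion", "disruption", "freight")):
--         return "lead_time_or_freight_risk"
--     if category == "finance" and any(term in text for term in ("ringgit", "usd", "myr", "oil")):
--         return "fx_or_energy_risk"
--     if category == "geopolitical":
--         if any(term in text for term in ("tariff", "trade war", "sanction")):
--             return "tariff_or_policy_risk"
--         return "geopolitical_supply_chain_risk"
--     return category
-- ===== SOURCE B (Python) =====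
-- _KEYWORD_CATEGORY = {
--     "congestion": "logistics", "disruption": "logistics", "freight": "logistics",
--     "ringgit": "finance", "usd": "finance", "myr": "finance", "oil": "finance",
--     "tariff": "geopolitical", "trade war": "geopolitical", "sanction": "geopolitical",
-- }
-- _HIT_LABEL = {
--     "logistics": "lead_time_or_freight_risk",
--     "finance": "fx_or_energy_risk",
--     "geopolitical": "tariff_or_policy_risk",
-- }
-- _MISS_LABEL = {"geopolitical": "geopolitical_supply_chain_risk"}
--
--
-- def _risk_hint(category: str, text: str) -> str:
--     hits = {cat for term, cat in _KEYWORD_CATEGORY.items() if term in text}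
--     if category in hits:
--         return _HIT_LABEL[category]
--     return _MISS_LABEL.get(category, category)
-- ===== Notes on version B (the rewrite author's own statement) =====
-- stated objective: alternative
-- what changed: Instead of A's per-category branch cascade that tests only its own category's keywords, B scans all keywords once against the text to build the set of matched categories, then resolves the label by two pure dict lookups (hit label, miss/default label).
import Mathlib
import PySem

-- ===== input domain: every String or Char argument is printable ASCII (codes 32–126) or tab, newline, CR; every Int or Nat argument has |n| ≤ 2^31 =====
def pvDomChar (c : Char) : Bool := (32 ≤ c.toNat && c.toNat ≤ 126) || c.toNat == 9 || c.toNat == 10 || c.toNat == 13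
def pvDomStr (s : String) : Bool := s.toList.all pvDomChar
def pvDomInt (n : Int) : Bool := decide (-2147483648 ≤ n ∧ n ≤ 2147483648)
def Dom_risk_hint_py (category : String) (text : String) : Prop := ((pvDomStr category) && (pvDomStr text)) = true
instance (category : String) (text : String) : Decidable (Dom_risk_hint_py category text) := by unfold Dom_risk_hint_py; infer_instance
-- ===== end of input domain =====

-- B replaces A's per-category branch cascade by one unconditional scan of all keywords that builds the
-- set of matched categories, then two dict lookups (alternative decomposition; same cost).

-- ===== PORT A =====
def risk_hint_py (category : String) (text : String) : String :=
  if category == "logistics" &&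
      (["congestion", "disruption", "freight"].any (fun term => PySem.Str.isIn term text)) then
    "lead_time_or_freight_risk"
  else if category == "finance" &&
      (["ringgit", "usd", "myr", "oil"].any (fun term => PySem.Str.isIn term text)) then
    "fx_or_energy_risk"
  else if category == "geopolitical" then
    if ["tariff", "trade war", "sanction"].any (fun term => PySem.Str.isIn term text) then
      "tariff_or_policy_risk"
    else
      "geopolitical_supply_chain_risk"
  else
    category

-- ===== PORT B =====
-- module-level tables of Source B
def pvKeywordCategory : PySem.Dict String String :=
  PySem.Dict.ofList
    [ ("congestion", "logistics"), ("disruption", "logistics"), ("freight", "logistics"),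
      ("ringgit", "finance"), ("usd", "finance"), ("myr", "finance"), ("oil", "finance"),
      ("tariff", "geopolitical"), ("trade war", "geopolitical"), ("sanction", "geopolitical") ]

def pvHitLabel : PySem.Dict String String :=
  PySem.Dict.ofList
    [ ("logistics", "lead_time_or_freight_risk"),
      ("finance", "fx_or_energy_risk"),
      ("geopolitical", "tariff_or_policy_risk") ]

def pvMissLabel : PySem.Dict String String :=
  PySem.Dict.ofList [("geopolitical", "geopolitical_supply_chain_risk")]

def risk_hint_py_alt (category : String) (text : String) : String :=
  -- hits = {cat for term, cat in _KEYWORD_CATEGORY.items() if term in text}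
  let hits : PySem.Set String :=
    PySem.Set.ofList ((pvKeywordCategory.items.filter (fun p => PySem.Str.isIn p.1 text)).map Prod.snd)
  if PySem.Set.contains hits category then
    -- _HIT_LABEL[category]; the KeyError branch is unreachable: every element of hits is a key of _HIT_LABEL
    (PySem.Dict.get? pvHitLabel category).getD category
  else
    PySem.Dict.getD pvMissLabel category category

-- ===== PRECONDITION & SPEC =====
def Spec_risk_hint_py (category : String) (text : String) (out : String) : Prop := out = risk_hint_py_alt category text
instance (category : String) (text : String) (out : String) : Decidable (Spec_risk_hint_py category text out) := by unfold Spec_risk_hint_py; infer_instance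

-- ===== CLAIM (what is proved, stated in full; the proofs are below) =====
def Claim_equal_risk_hint_py : Prop := ∀ (category : String) (text : String), Dom_risk_hint_py category text → Spec_risk_hint_py category text (risk_hint_py category text)

-- ===== LEMMAS AND PROOFS =====

-- the matched-category set of B contains `category` exactly when one of A's tests for that category fires
theorem pv_contains_hits (category text : String) :
    PySem.Set.contains (PySem.Set.ofList ((pvKeywordCategory.items.filter (fun p => PySem.Str.isIn p.1 text)).map Prod.snd)) category
    = ((category == "logistics") && (["congestion","disruption","freight"].any (fun t => PySem.Str.isIn t text))
      || (category == "finance") && (["ringgit","usd","myr","oil"].any (fun t => PySem.Str.isIn t text))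
      || (category == "geopolitical") && (["tariff","trade war","sanction"].any (fun t => PySem.Str.isIn t text))) := by
  have hitems : pvKeywordCategory.items =
    [ ("congestion", "logistics"), ("disruption", "logistics"), ("freight", "logistics"),
      ("ringgit", "finance"), ("usd", "finance"), ("myr", "finance"), ("oil", "finance"),
      ("tariff", "geopolitical"), ("trade war", "geopolitical"), ("sanction", "geopolitical") ] := rfl
  rw [hitems, Bool.eq_iff_iff, PySem.Set.contains_iff, PySem.Set.mem_ofList]
  simp [List.mem_map, List.mem_filter]
  constructor
  · rintro ⟨a, h, hin⟩
    rcases h with ⟨rfl,rfl⟩|⟨rfl,rfl⟩|⟨rfl,rfl⟩|⟨rfl,rfl⟩|⟨rfl,rfl⟩|⟨rfl,rfl⟩|⟨rfl,rfl⟩|⟨rfl,rfl⟩|⟨rfl,rfl⟩|⟨rfl,rfl⟩ <;> simp_all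
  · rintro ((⟨rfl,h⟩|⟨rfl,h⟩)|⟨rfl,h⟩)
    · rcases h with h|h|h
      exacts [⟨"congestion", by decide, h⟩, ⟨"disruption", by decide, h⟩, ⟨"freight", by decide, h⟩]
    · rcases h with h|h|h|h
      exacts [⟨"ringgit", by decide, h⟩, ⟨"usd", by decide, h⟩, ⟨"myr", by decide, h⟩, ⟨"oil", by decide, h⟩]
    · rcases h with h|h|h
      exacts [⟨"tariff", by decide, h⟩, ⟨"trade war", by decide, h⟩, ⟨"sanction", by decide, h⟩]

-- ===== VERDICT =====
theorem risk_hint_py_spec : Claim_equal_risk_hint_py := by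
  intro category text _
  unfold Spec_risk_hint_py risk_hint_py risk_hint_py_alt
  simp only [pv_contains_hits]
  by_cases h1 : category = "logistics"
  · subst h1
    simp only [PySem.Dict.get?, PySem.Dict.getD]
    simp
    split_ifs <;> rfl
  · by_cases h2 : category = "finance"
    · subst h2
      simp only [PySem.Dict.get?, PySem.Dict.getD]
      simp
      split_ifs <;> rfl
    · by_cases h3 : category = "geopolitical"
      · subst h3
        simp only [PySem.Dict.get?, PySem.Dict.getD]
        simp
        split_ifs <;> rfl
      · have b1 : (category == "logistics") = false := by simp [h1]
        have b2 : (category == "finance") = false := by simp [h2]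
        have b3 : (category == "geopolitical") = false := by simp [h3]
        have b3' : ("geopolitical" == category) = false := by simp [Ne.symm h3]
        have hm : pvMissLabel.items = [("geopolitical", "geopolitical_supply_chain_risk")] := rfl
        simp [b1, b2, b3, PySem.Dict.getD, PySem.Dict.get?, hm, List.find?, b3']
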